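-- pv_equiv track=rewrite | github.com/JakuWorks/Projects | Projects/Small/(W.I.P) Self-HostedSimpleDiscordBot (.py)/W.I.P/Assets/helper_functions.py | predictable_shuffle_string
-- ===== SOURCE A (Python) =====
-- from math import ceil
--
-- def predictable_shuffle_string(my_str: str) -> str:
--     """
--     This function was written to shuffle a string without any randomness. It was \
--     designed to make the inputted string be hard to recreate by an average Joe.
--     :param my_str: This is the string to be shuffled:
--     :return: The shuffled string.
--     """
--
--     my_str: str = my_str[::-1]
--
--     def recursive_unsort(my_slice: str) -> str:
--         my_slice_len: int = len(my_slice)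
--
--         if my_slice_len <= 2:
--             return my_slice
--
--         new_slice: str = ''
--
--         for i in range(ceil(my_slice_len / 2)):
--             new_slice += my_slice[i:i + 1] + my_slice[-i - 1]
--
--         new_slice_len: int = len(new_slice)
--
--         if len(new_slice) > my_slice_len:
--             new_slice: str = new_slice[:-1]
--             new_slice_len: int = len(new_slice)
--
--         new_slice_half_pos: int = ceil(new_slice_len/2)
--
--         half1 = recursive_unsort(new_slice[:new_slice_half_pos])
--         half2 = recursive_unsort(new_slice[new_slice_half_pos:])
--
--         return half1 + half2
--
--     for _ in range(len(my_str)):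
--         my_str: str = recursive_unsort(my_str)
--
--     return recursive_unsort(my_str)
-- ===== SOURCE B (Python) =====
-- def predictable_shuffle_string(my_str: str) -> str:
--     """Shuffle a string deterministically: compute the index permutation of one
--     'unsort' pass once, raise it to the (n+1)-th power by binary exponentiation,
--     and apply it to the reversed input in a single pass."""
--     chars = list(reversed(my_str))
--     n = len(chars)
--     base = _unsort_perm(list(range(n)))
--     power = _perm_power(base, n + 1)
--     return ''.join(chars[i] for i in power)
--
--
-- def _unsort_perm(idx):
--     """One 'unsort' pass acting on a list of source indices."""
--     m = len(idx)
--     if m <= 2: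
--         return idx
--     c = (m + 1) // 2
--     new = []
--     for i in range(c):
--         new.append(idx[i])
--         new.append(idx[m - 1 - i])
--     if len(new) > m:
--         new.pop()
--     h = (len(new) + 1) // 2
--     return _unsort_perm(new[:h]) + _unsort_perm(new[h:])
--
--
-- def _perm_power(p, k):
--     """k-th power of permutation p (result[j] = source index after k passes),
--     by binary exponentiation; composing q after r is [r[j] for j in q]."""
--     result = list(range(len(p)))
--     while k > 0:
--         if k & 1:
--             result = [p[j] for j in result]
--         p = [p[j] for j in p]
--         k >>= 1
--     return result
-- ===== Notes on version B (the rewrite author's own statement) =====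
-- stated objective: faster
-- what changed: A re-runs the divide-and-conquer string shuffle n+1 times; B computes the index permutation of one pass once (on a list of indices), raises it to the (n+1)-th power by binary exponentiation of permutation composition, and applies it to the reversed string in a single pass.
import Mathlib
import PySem

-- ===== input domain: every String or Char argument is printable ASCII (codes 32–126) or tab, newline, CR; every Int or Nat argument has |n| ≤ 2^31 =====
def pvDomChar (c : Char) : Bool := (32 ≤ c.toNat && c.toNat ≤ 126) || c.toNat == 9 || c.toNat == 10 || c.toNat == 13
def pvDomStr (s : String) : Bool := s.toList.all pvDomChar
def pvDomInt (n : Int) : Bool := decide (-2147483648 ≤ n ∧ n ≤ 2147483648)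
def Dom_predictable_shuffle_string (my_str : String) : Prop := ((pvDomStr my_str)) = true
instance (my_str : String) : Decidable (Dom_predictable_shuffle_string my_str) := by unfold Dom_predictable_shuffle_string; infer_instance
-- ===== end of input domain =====

-- B replaces A's n+1 re-runs of the divide-and-conquer shuffle by one index-permutation
-- computation whose (n+1)-th power is taken by binary exponentiation and applied once.

-- ===== PORT A =====
-- the loop of recursive_unsort:
--   for i in range(ceil(len/2)): new_slice += my_slice[i:i+1] + my_slice[-i-1]
-- (math.ceil(m/2) on a nonnegative int m is exactly (m+1)/2; my_slice[-i-1] is an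
--  indexing that never raises here, so its Option is materialised with .toList)
def pvNewSlice {α : Type} (s : List α) : List α :=
  (PySem.List.pyRange 0 (((s.length + 1) / 2 : Nat) : Int) 1).foldl
    (fun acc i => acc ++ (PySem.List.slice s (some i) (some (i + 1)) ++
                          (PySem.List.pyGet? s (-i - 1)).toList)) []

-- new_slice after 'if len(new_slice) > my_slice_len: new_slice = new_slice[:-1]'
def pvTrim {α : Type} (s : List α) : List α :=
  if s.length < (pvNewSlice s).length then PySem.List.slice (pvNewSlice s) none (some (-1))
  else pvNewSlice s

-- A's recursive_unsort, element-type-polymorphic (it only moves elements around);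
-- the fuel argument only bounds the recursion depth (each call strictly shrinks the
-- slice, so s.length fuel always suffices: pvUnsortAF_congr below)
def pvUnsortAF {α : Type} : Nat → List α → List α
  | 0, s => s
  | fuel + 1, s =>
    if s.length ≤ 2 then s
    else
      -- half1 = recursive_unsort(new_slice[:half]); half2 = recursive_unsort(new_slice[half:])
      pvUnsortAF fuel (PySem.List.slice (pvTrim s) none (some ((((pvTrim s).length + 1) / 2 : Nat) : Int))) ++
      pvUnsortAF fuel (PySem.List.slice (pvTrim s) (some ((((pvTrim s).length + 1) / 2 : Nat) : Int)) none)

def pvUnsortA {α : Type} (s : List α) : List α := pvUnsortAF s.length s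

def predictable_shuffle_string (my_str : String) : String :=
  -- my_str = my_str[::-1] is reversal (PySem.Str.slice?_none_none_neg_one)
  -- for _ in range(len(my_str)): my_str = recursive_unsort(my_str); return recursive_unsort(my_str)
  String.ofList (pvUnsortA
    ((PySem.List.pyRange 0 (my_str.toList.reverse.length : Int) 1).foldl
      (fun t _ => pvUnsortA t) my_str.toList.reverse))

-- ===== PORT B =====
-- for i in range(c): new.append(idx[i]); new.append(idx[m - 1 - i])
def pvNewB (idx : List Int) : List Int :=
  (PySem.List.pyRange 0 (((idx.length + 1) / 2 : Nat) : Int) 1).foldl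
    (fun acc i => (acc ++ [PySem.List.pyGetD idx i 0]) ++
                  [PySem.List.pyGetD idx ((idx.length : Int) - 1 - i) 0]) []

-- if len(new) > m: new.pop()
def pvTrimB (idx : List Int) : List Int :=
  if idx.length < (pvNewB idx).length then (pvNewB idx).dropLast else pvNewB idx

-- _unsort_perm: one pass acting on a list of source indices (fuel as in pvUnsortAF)
def pvUnsortPermBF : Nat → List Int → List Int
  | 0, idx => idx
  | fuel + 1, idx =>
    if idx.length ≤ 2 then idx
    else
      pvUnsortPermBF fuel ((pvTrimB idx).take (((pvTrimB idx).length + 1) / 2)) ++   -- new[:h]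
      pvUnsortPermBF fuel ((pvTrimB idx).drop (((pvTrimB idx).length + 1) / 2))      -- new[h:]

def pvUnsortPermB (idx : List Int) : List Int := pvUnsortPermBF idx.length idx

-- _perm_power: binary exponentiation; 'while k > 0' halves k each pass, so k.toNat
-- fuel always suffices (pvPermPowerF_congr below)
def pvPermPowerF : Nat → List Int → Int → List Int → List Int
  | 0, _, _, result => result
  | fuel + 1, p, k, result =>
    if k ≤ 0 then result
    else
      -- if k & 1: result = [p[j] for j in result];  p = [p[j] for j in p];  k >>= 1
      pvPermPowerF fuel (p.map (fun j => PySem.List.pyGetD p j 0)) (k >>> (1 : Nat))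
        (if PySem.Int.band k 1 ≠ 0 then result.map (fun j => PySem.List.pyGetD p j 0) else result)

def pvPermPower (p : List Int) (k : Int) (result : List Int) : List Int :=
  pvPermPowerF k.toNat p k result

def predictable_shuffle_string_alt (my_str : String) : String :=
  let chars : List Char := my_str.toList.reverse      -- list(reversed(my_str))
  let base := pvUnsortPermB (PySem.List.pyRange 0 (chars.length : Int) 1)  -- _unsort_perm(list(range(n)))
  let power := pvPermPower base ((chars.length : Int) + 1)
      (PySem.List.pyRange 0 (base.length : Int) 1)    -- result = list(range(len(p)))
  String.ofList (power.map (fun i => PySem.List.pyGetD chars i ' '))  -- ''.join(chars[i] for i in power)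

-- ===== PRECONDITION & SPEC =====
def Spec_predictable_shuffle_string (my_str : String) (out : String) : Prop := out = predictable_shuffle_string_alt my_str
instance (my_str : String) (out : String) : Decidable (Spec_predictable_shuffle_string my_str out) := by unfold Spec_predictable_shuffle_string; infer_instance

-- ===== CLAIM (what is proved, stated in full; the proofs are below) =====
def Claim_equal_predictable_shuffle_string : Prop := ∀ (my_str : String), Dom_predictable_shuffle_string my_str → Spec_predictable_shuffle_string my_str (predictable_shuffle_string my_str)

-- ===== LEMMAS AND PROOFS =====

-- length bookkeeping for the fuel arguments
theorem pvFoldl_append_len_le {β γ : Type} (l : List β) (g : β → List γ)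
    (h : ∀ x ∈ l, (g x).length ≤ 2) :
    (l.foldl (fun acc x => acc ++ g x) []).length ≤ 2 * l.length := by
  rw [PySem.List.foldl_append_eq_flatMap]
  simp only [List.nil_append, List.length_flatMap]
  calc (l.map fun x => (g x).length).sum ≤ (l.map fun x => (g x).length).length • 2 :=
        List.sum_le_card_nsmul _ 2 (by intro x hx; simp only [List.mem_map] at hx
                                       obtain ⟨y, hy, rfl⟩ := hx; exact h y hy)
    _ = 2 * l.length := by simp [smul_eq_mul, Nat.mul_comm]

theorem pvNewSlice_len_le {α : Type} (s : List α) :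
    (pvNewSlice s).length ≤ 2 * ((s.length + 1) / 2) := by
  have h2all : ∀ i ∈ PySem.List.pyRange 0 (((s.length + 1) / 2 : Nat) : Int) 1,
      ((fun i => PySem.List.slice s (some i) (some (i + 1)) ++
                 (PySem.List.pyGet? s (-i - 1)).toList) i).length ≤ 2 := by
    intro i hi
    rw [PySem.List.mem_pyRange_one] at hi
    have h0 : 0 ≤ i := hi.1
    rw [List.length_append]
    have h1 : (PySem.List.slice s (some i) (some (i + 1))).length ≤ 1 := by
      rw [PySem.List.length_slice]
      have hi1 : i + 1 = ((i.toNat + 1 : Nat) : Int) := by omega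
      have hi' : i = ((i.toNat : Nat) : Int) := by omega
      rw [hi1, hi', PySem.List.clampIdx_natCast, PySem.List.clampIdx_natCast]
      omega
    have h2 : (PySem.List.pyGet? s (-i - 1)).toList.length ≤ 1 := by
      cases PySem.List.pyGet? s (-i - 1) <;> simp
    omega
  calc (pvNewSlice s).length
      ≤ 2 * (PySem.List.pyRange 0 (((s.length + 1) / 2 : Nat) : Int) 1).length :=
        pvFoldl_append_len_le _ _ h2all
    _ ≤ 2 * ((s.length + 1) / 2) := by rw [PySem.List.length_pyRange_one]; omega

theorem pvTrim_len_le {α : Type} (s : List α) : (pvTrim s).length ≤ s.length := by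
  have hb := pvNewSlice_len_le s
  unfold pvTrim
  split
  · rw [PySem.List.slice_to_neg_one]; simp only [List.length_dropLast]; omega
  · omega

theorem pvPairFoldl_len {β γ : Type} (l : List β) (f g : β → γ) (init : List γ) :
    (l.foldl (fun acc x => (acc ++ [f x]) ++ [g x]) init).length = init.length + 2 * l.length := by
  induction l generalizing init with
  | nil => simp
  | cons y ys ih => rw [List.foldl_cons, ih]; simp; omega

theorem pvTrimB_len_le (idx : List Int) : (pvTrimB idx).length ≤ idx.length := by
  have hb : (pvNewB idx).length = 2 * ((idx.length + 1) / 2) := by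
    unfold pvNewB
    rw [pvPairFoldl_len, PySem.List.length_pyRange_one]
    simp only [List.length_nil]; omega
  unfold pvTrimB
  split
  · simp only [List.length_dropLast]; omega
  · omega

-- the fuel arguments are irrelevant once they bound the recursion depth
theorem pvUnsortAF_congr {α : Type} :
    ∀ (f g : Nat) (s : List α), s.length ≤ f → s.length ≤ g → pvUnsortAF f s = pvUnsortAF g s := by
  intro f
  induction f with
  | zero =>
    intro g s hf _
    have h2 : s.length ≤ 2 := by omega
    cases g with
    | zero => rfl
    | succ g => show s = pvUnsortAF (g + 1) s; simp only [pvUnsortAF]; rw [if_pos h2]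
  | succ f ih =>
    intro g s hf hg
    cases g with
    | zero =>
      have h2 : s.length ≤ 2 := by omega
      show pvUnsortAF (f + 1) s = s
      simp only [pvUnsortAF]; rw [if_pos h2]
    | succ g =>
      simp only [pvUnsortAF]
      by_cases h : s.length ≤ 2
      · rw [if_pos h, if_pos h]
      · rw [if_neg h, if_neg h, PySem.List.slice_to_natCast, PySem.List.slice_from_natCast]
        have hT := pvTrim_len_le s
        congr 1
        · exact ih g _ (by simp only [List.length_take]; omega)
            (by simp only [List.length_take]; omega)
        · exact ih g _ (by simp only [List.length_drop]; omega)
            (by simp only [List.length_drop]; omega)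

theorem pvUnsortA_base {α : Type} {s : List α} (h : s.length ≤ 2) : pvUnsortA s = s := by
  unfold pvUnsortA
  rcases hl : s.length with _ | f
  · rfl
  · simp only [pvUnsortAF]; rw [if_pos h]

theorem pvUnsortPermBF_congr :
    ∀ (f g : Nat) (idx : List Int), idx.length ≤ f → idx.length ≤ g →
      pvUnsortPermBF f idx = pvUnsortPermBF g idx := by
  intro f
  induction f with
  | zero =>
    intro g idx hf _
    have h2 : idx.length ≤ 2 := by omega
    cases g with
    | zero => rfl
    | succ g => show idx = pvUnsortPermBF (g + 1) idx; simp only [pvUnsortPermBF]; rw [if_pos h2]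
  | succ f ih =>
    intro g idx hf hg
    cases g with
    | zero =>
      have h2 : idx.length ≤ 2 := by omega
      show pvUnsortPermBF (f + 1) idx = idx
      simp only [pvUnsortPermBF]; rw [if_pos h2]
    | succ g =>
      simp only [pvUnsortPermBF]
      by_cases h : idx.length ≤ 2
      · rw [if_pos h, if_pos h]
      · rw [if_neg h, if_neg h]
        have hT := pvTrimB_len_le idx
        congr 1
        · exact ih g _ (by simp only [List.length_take]; omega)
            (by simp only [List.length_take]; omega)
        · exact ih g _ (by simp only [List.length_drop]; omega)
            (by simp only [List.length_drop]; omega)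

theorem pvUnsortPermB_base {idx : List Int} (h : idx.length ≤ 2) : pvUnsortPermB idx = idx := by
  unfold pvUnsortPermB
  rcases hl : idx.length with _ | f
  · rfl
  · simp only [pvUnsortPermBF]; rw [if_pos h]

theorem pvUnsortPermB_unfold (idx : List Int) (h : ¬ idx.length ≤ 2) :
    pvUnsortPermB idx = pvUnsortPermB ((pvTrimB idx).take (((pvTrimB idx).length + 1) / 2)) ++
      pvUnsortPermB ((pvTrimB idx).drop (((pvTrimB idx).length + 1) / 2)) := by
  unfold pvUnsortPermB
  obtain ⟨f, hf⟩ : ∃ f, idx.length = f + 1 := ⟨idx.length - 1, by omega⟩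
  conv_lhs => rw [hf]
  simp only [pvUnsortPermBF]
  rw [if_neg h]
  have hT := pvTrimB_len_le idx
  congr 1
  · exact pvUnsortPermBF_congr f _ _ (by simp only [List.length_take]; omega) le_rfl
  · exact pvUnsortPermBF_congr f _ _ (by simp only [List.length_drop]; omega) le_rfl

theorem pvPermPowerF_congr :
    ∀ (f g : Nat) (p : List Int) (k : Int) (r : List Int), k.toNat ≤ f → k.toNat ≤ g →
      pvPermPowerF f p k r = pvPermPowerF g p k r := by
  intro f
  induction f with
  | zero =>
    intro g p k r hf _
    have h0 : k ≤ 0 := by omega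
    cases g with
    | zero => rfl
    | succ g => show r = pvPermPowerF (g + 1) p k r; simp only [pvPermPowerF]; rw [if_pos h0]
  | succ f ih =>
    intro g p k r hf hg
    cases g with
    | zero =>
      have h0 : k ≤ 0 := by omega
      show pvPermPowerF (f + 1) p k r = r
      simp only [pvPermPowerF]; rw [if_pos h0]
    | succ g =>
      simp only [pvPermPowerF]
      by_cases h : k ≤ 0
      · rw [if_pos h, if_pos h]
      · rw [if_neg h, if_neg h]
        have hs : (k >>> (1 : Nat)).toNat ≤ f ∧ (k >>> (1 : Nat)).toNat ≤ g := by
          rw [Int.shiftRight_eq_div_pow]; norm_num; omega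
        exact ih g _ _ _ hs.1 hs.2

theorem pvPermPower_base {p : List Int} {k : Int} {r : List Int} (h : k ≤ 0) :
    pvPermPower p k r = r := by
  unfold pvPermPower
  have h0 : k.toNat = 0 := by omega
  rw [h0]
  rfl

theorem pvPermPower_step {p : List Int} {k : Int} {r : List Int} (h : ¬ k ≤ 0) :
    pvPermPower p k r = pvPermPower (p.map (fun j => PySem.List.pyGetD p j 0)) (k >>> (1 : Nat))
      (if PySem.Int.band k 1 ≠ 0 then r.map (fun j => PySem.List.pyGetD p j 0) else r) := by
  unfold pvPermPower
  obtain ⟨f, hf⟩ : ∃ f, k.toNat = f + 1 := ⟨k.toNat - 1, by omega⟩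
  conv_lhs => rw [hf]
  simp only [pvPermPowerF]
  rw [if_neg h]
  exact pvPermPowerF_congr f _ _ _ _
    (by rw [Int.shiftRight_eq_div_pow]; norm_num; omega) le_rfl


-- apply a list of source indices to a list: [l[i] for i in p]
def pvApply {α : Type} (p : List Int) (l : List α) (d : α) : List α :=
  p.map (fun i => PySem.List.pyGetD l i d)

-- all entries are valid indices into a list of length n
def pvGood (n : Nat) (p : List Int) : Prop := ∀ i ∈ p, 0 ≤ i ∧ i < (n : Int)

def pvId (n : Nat) : List Int := PySem.List.pyRange 0 (n : Int) 1

-- m-th power of the index permutation p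
def pvPow (p : List Int) : Nat → List Int
  | 0 => pvId p.length
  | m + 1 => pvApply (pvPow p m) p 0

-- the loop of recursive_unsort picks the pairs (s[i], s[len-1-i])
theorem pvNewSlice_eq {α : Type} (s : List α) (d : α) (h3 : ¬ s.length ≤ 2) :
    pvNewSlice s = (PySem.List.pyRange 0 (((s.length + 1) / 2 : Nat) : Int) 1).flatMap
      (fun i => [PySem.List.pyGetD s i d, PySem.List.pyGetD s ((s.length : Int) - 1 - i) d]) := by
  unfold pvNewSlice
  rw [PySem.List.foldl_append_eq_flatMap, List.nil_append]
  apply List.flatMap_congr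
  intro i hi
  rw [PySem.List.mem_pyRange_one] at hi
  have h0 : 0 ≤ i := hi.1
  have h1 : i < (s.length : Int) := by omega
  rw [PySem.List.slice_toNat s h0 (by omega)]
  have hlt : i.toNat < s.length := by omega
  rw [List.drop_eq_getElem_cons hlt]
  have ht1 : (i + 1).toNat - i.toNat = 1 := by omega
  rw [ht1]
  simp only [List.take_succ_cons, List.take_zero]
  have hneg : -i - 1 = -((i.toNat + 1 : Nat) : Int) := by omega
  rw [hneg, PySem.List.pyGet?_neg_natCast s (i.toNat + 1) (by omega) (by omega)]
  have hlt2 : s.length - (i.toNat + 1) < s.length := by omega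
  rw [List.getElem?_eq_getElem hlt2]
  rw [PySem.List.pyGetD_eq_getElem s d h0 h1,
      PySem.List.pyGetD_eq_getElem s d (by omega) (by omega)]
  have hidx : s.length - (i.toNat + 1) = ((s.length : Int) - 1 - i).toNat := by omega
  simp only [Option.toList_some, List.cons_append, List.nil_append, hidx]

theorem pvNewSlice_length {α : Type} (s : List α) (h3 : ¬ s.length ≤ 2) :
    (pvNewSlice s).length = 2 * ((s.length + 1) / 2) := by
  cases s with
  | nil => simp at h3
  | cons a t =>
    rw [pvNewSlice_eq (a :: t) a h3, List.length_flatMap]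
    simp only [List.length_cons, List.length_nil]
    rw [List.map_const', List.sum_replicate, PySem.List.length_pyRange_one]
    simp [smul_eq_mul]
    omega

theorem pvTrim_length {α : Type} (s : List α) (h : ¬ s.length ≤ 2) :
    (pvTrim s).length = s.length := by
  have h2 := pvNewSlice_length s h
  unfold pvTrim
  split
  · rw [PySem.List.slice_to_neg_one]; simp only [List.length_dropLast]; omega
  · omega

theorem pvTrim_mem {α : Type} {s : List α} (h : ¬ s.length ≤ 2) {x : α}
    (hx : x ∈ pvTrim s) : x ∈ s := by
  have hx' : x ∈ pvNewSlice s := by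
    unfold pvTrim at hx
    split at hx
    · rw [PySem.List.slice_to_neg_one] at hx
      exact (List.dropLast_sublist (pvNewSlice s)).subset hx
    · exact hx
  cases s with
  | nil => simp at h
  | cons a t =>
    rw [pvNewSlice_eq (a :: t) a h] at hx'
    rw [List.mem_flatMap] at hx'
    obtain ⟨i, hi, hxi⟩ := hx'
    rw [PySem.List.mem_pyRange_one] at hi
    have h0 : 0 ≤ i := hi.1
    have h1 : i < ((a :: t).length : Int) := by omega
    simp only [List.mem_cons, List.not_mem_nil, or_false] at hxi
    rcases hxi with rfl | rfl
    · rw [PySem.List.pyGetD_eq_getElem _ a h0 h1]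
      exact List.getElem_mem _
    · rw [PySem.List.pyGetD_eq_getElem _ a (by omega) (by omega)]
      exact List.getElem_mem _

theorem pvUnsortA_eq {α : Type} (s : List α) (h : ¬ s.length ≤ 2) :
    pvUnsortA s = pvUnsortA ((pvTrim s).take (((pvTrim s).length + 1) / 2)) ++
      pvUnsortA ((pvTrim s).drop (((pvTrim s).length + 1) / 2)) := by
  unfold pvUnsortA
  obtain ⟨f, hf⟩ : ∃ f, s.length = f + 1 := ⟨s.length - 1, by omega⟩
  conv_lhs => rw [hf]
  simp only [pvUnsortAF]
  rw [if_neg h, PySem.List.slice_to_natCast, PySem.List.slice_from_natCast]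
  have hT := pvTrim_len_le s
  congr 1
  · exact pvUnsortAF_congr f _ _ (by simp only [List.length_take]; omega) le_rfl
  · exact pvUnsortAF_congr f _ _ (by simp only [List.length_drop]; omega) le_rfl

theorem pvUnsortA_length {α : Type} (s : List α) : (pvUnsortA s).length = s.length := by
  suffices H : ∀ (n : Nat) (s : List α), s.length ≤ n → (pvUnsortA s).length = s.length from
    H s.length s le_rfl
  intro n
  induction n with
  | zero =>
    intro s hs
    rw [pvUnsortA_base (by omega)]
  | succ n ih =>
    intro s hs
    by_cases h : s.length ≤ 2
    · rw [pvUnsortA_base h]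
    · rw [pvUnsortA_eq s h, List.length_append]
      have hT := pvTrim_length s h
      rw [ih _ (by simp only [List.length_take]; omega),
          ih _ (by simp only [List.length_drop]; omega)]
      simp only [List.length_take, List.length_drop]
      omega

theorem pvUnsortA_mem {α : Type} {s : List α} {x : α} (hx : x ∈ pvUnsortA s) : x ∈ s := by
  suffices H : ∀ (n : Nat) (s : List α), s.length ≤ n → ∀ x, x ∈ pvUnsortA s → x ∈ s from
    H s.length s le_rfl x hx
  intro n
  induction n with
  | zero =>
    intro s hs x hx
    rwa [pvUnsortA_base (by omega)] at hx
  | succ n ih =>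
    intro s hs x hx
    by_cases h : s.length ≤ 2
    · rwa [pvUnsortA_base h] at hx
    · rw [pvUnsortA_eq s h, List.mem_append] at hx
      have hT := pvTrim_length s h
      rcases hx with hx | hx
      · exact pvTrim_mem h (List.take_subset _ _
          (ih _ (by simp only [List.length_take]; omega) x hx))
      · exact pvTrim_mem h (List.drop_subset _ _
          (ih _ (by simp only [List.length_drop]; omega) x hx))

theorem pvNewSlice_map {α β : Type} (g : α → β) (s : List α) (h : ¬ s.length ≤ 2) :
    pvNewSlice (s.map g) = (pvNewSlice s).map g := by
  cases s with
  | nil => simp at h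
  | cons a t =>
    rw [pvNewSlice_eq ((a :: t).map g) (g a) (by simpa using h),
        pvNewSlice_eq (a :: t) a h, List.map_flatMap]
    simp only [List.length_map]
    apply List.flatMap_congr
    intro i _
    simp only [PySem.List.pyGetD_map]
    simp only [List.map_cons, List.map_nil]

theorem pvTrim_map {α β : Type} (g : α → β) (s : List α) (h : ¬ s.length ≤ 2) :
    pvTrim (s.map g) = (pvTrim s).map g := by
  unfold pvTrim
  rw [pvNewSlice_map g s h]
  simp only [List.length_map, PySem.List.slice_to_neg_one]
  by_cases hc : s.length < (pvNewSlice s).length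
  · simp only [if_pos hc, ← List.map_dropLast]
  · simp only [if_neg hc]

theorem pvUnsortA_map {α β : Type} (g : α → β) (s : List α) :
    pvUnsortA (s.map g) = (pvUnsortA s).map g := by
  suffices H : ∀ (n : Nat) (s : List α), s.length ≤ n →
      pvUnsortA (s.map g) = (pvUnsortA s).map g from H s.length s le_rfl
  intro n
  induction n with
  | zero =>
    intro s hs
    rw [pvUnsortA_base (by simp only [List.length_map]; omega), pvUnsortA_base (by omega)]
  | succ n ih =>
    intro s hs
    by_cases h : s.length ≤ 2
    · rw [pvUnsortA_base (by simp only [List.length_map]; omega), pvUnsortA_base h]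
    · have hT := pvTrim_length s h
      rw [pvUnsortA_eq (s.map g) (by simp only [List.length_map]; omega),
          pvUnsortA_eq s h, pvTrim_map g s h]
      simp only [List.length_map, ← List.map_take, ← List.map_drop]
      rw [ih _ (by simp only [List.length_take]; omega),
          ih _ (by simp only [List.length_drop]; omega), List.map_append]

-- B's index pass is A's pass acting on indices
theorem pvTrimB_eq (idx : List Int) (h : ¬ idx.length ≤ 2) : pvTrimB idx = pvTrim idx := by
  have hnew : pvNewB idx = pvNewSlice idx := by
    unfold pvNewB
    have hfn : (fun (acc : List Int) (i : Int) =>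
        (acc ++ [PySem.List.pyGetD idx i 0]) ++ [PySem.List.pyGetD idx ((idx.length : Int) - 1 - i) 0])
        = (fun acc i => acc ++ [PySem.List.pyGetD idx i 0,
                                PySem.List.pyGetD idx ((idx.length : Int) - 1 - i) 0]) := by
      funext acc i; simp
    rw [hfn, PySem.List.foldl_append_eq_flatMap, List.nil_append, ← pvNewSlice_eq idx 0 h]
  unfold pvTrimB pvTrim
  rw [hnew, PySem.List.slice_to_neg_one]

theorem pvUnsortPermB_eq (idx : List Int) : pvUnsortPermB idx = pvUnsortA idx := by
  suffices H : ∀ (n : Nat) (idx : List Int), idx.length ≤ n → pvUnsortPermB idx = pvUnsortA idx from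
    H idx.length idx le_rfl
  intro n
  induction n with
  | zero =>
    intro idx hs
    rw [pvUnsortPermB_base (by omega), pvUnsortA_base (by omega)]
  | succ n ih =>
    intro idx hs
    by_cases h : idx.length ≤ 2
    · rw [pvUnsortPermB_base h, pvUnsortA_base h]
    · have hT := pvTrim_length idx h
      rw [pvUnsortPermB_unfold idx h, pvTrimB_eq idx h, pvUnsortA_eq idx h]
      rw [ih _ (by simp only [List.length_take]; omega),
          ih _ (by simp only [List.length_drop]; omega)]

theorem pvApply_length {α : Type} (p : List Int) (l : List α) (d : α) :
    (pvApply p l d).length = p.length := List.length_map ..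

theorem pvApply_mem {α : Type} {p : List Int} {l : List α} {d : α} {x : α}
    (hp : pvGood l.length p) (hx : x ∈ pvApply p l d) : x ∈ l := by
  unfold pvApply at hx
  rw [List.mem_map] at hx
  obtain ⟨i, hi, rfl⟩ := hx
  rw [PySem.List.pyGetD_eq_getElem l d (hp i hi).1 (hp i hi).2]
  exact List.getElem_mem _

theorem pvGood_apply {n : Nat} {a b : List Int} (ha : pvGood b.length a) (hb : pvGood n b) :
    pvGood n (pvApply a b 0) := fun x hx => hb x (pvApply_mem ha hx)

-- composition law: indexing through a composed permutation = indexing twice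
theorem pvApply_apply {α : Type} (a b : List Int) (s : List α) (d : α)
    (ha : pvGood b.length a) :
    pvApply (pvApply a b 0) s d = pvApply a (pvApply b s d) d := by
  unfold pvApply
  rw [List.map_map]
  apply List.map_congr_left
  intro i hi
  have h0 := (ha i hi).1
  have h1 := (ha i hi).2
  have h1' : i < ((b.map fun i => PySem.List.pyGetD s i d).length : Int) := by
    simp only [List.length_map]; omega
  simp only [Function.comp_apply]
  rw [PySem.List.pyGetD_eq_getElem b 0 h0 h1,
      PySem.List.pyGetD_eq_getElem _ d h0 h1', List.getElem_map]

theorem pvGood_id (n : Nat) : pvGood n (pvId n) := by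
  intro i hi
  rw [pvId, PySem.List.mem_pyRange_one] at hi
  omega

theorem pvId_length (n : Nat) : (pvId n).length = n := by
  rw [pvId, PySem.List.length_pyRange_one]; omega

theorem pvApply_id_left {α : Type} (l : List α) (d : α) : pvApply (pvId l.length) l d = l := by
  have := PySem.List.map_pyGetD_pyRange_zero l d
  simpa [pvApply, pvId, PySem.List.len] using this

theorem pvApply_id_right {n : Nat} {p : List Int} (hp : pvGood n p) :
    pvApply p (pvId n) 0 = p := by
  unfold pvApply
  conv_rhs => rw [← List.map_id p]
  apply List.map_congr_left
  intro i hi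
  have h0 := (hp i hi).1
  have h1 : i < ((pvId n).length : Int) := by rw [pvId_length]; exact (hp i hi).2
  rw [PySem.List.pyGetD_eq_getElem _ 0 h0 h1]
  unfold pvId
  rw [PySem.List.getElem_pyRange_one 0 (n : Int) i.toNat
      (by rw [PySem.List.length_pyRange_one]; have := (hp i hi).2; omega)]
  simp only [id_eq]
  omega

theorem pvPow_length {p : List Int} (m : Nat) : (pvPow p m).length = p.length := by
  induction m with
  | zero => exact pvId_length _
  | succ m ih =>
    show (pvApply (pvPow p m) p 0).length = p.length
    rw [pvApply_length]
    exact ih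

theorem pvPow_good {p : List Int} (hp : pvGood p.length p) (m : Nat) :
    pvGood p.length (pvPow p m) := by
  induction m with
  | zero => exact pvGood_id _
  | succ m ih => exact pvGood_apply ih hp

theorem pvPow_succ_left {p : List Int} (hp : pvGood p.length p) (m : Nat) :
    pvApply p (pvPow p m) 0 = pvPow p (m + 1) := by
  induction m with
  | zero =>
    show pvApply p (pvId p.length) 0 = pvApply (pvId p.length) p 0
    rw [pvApply_id_right hp, pvApply_id_left p 0]
  | succ m ih =>
    show pvApply p (pvApply (pvPow p m) p 0) 0 = pvApply (pvPow p (m + 1)) p 0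
    rw [← pvApply_apply p (pvPow p m) p 0 (by rw [pvPow_length]; exact hp), ih]

theorem pvPow_sq {p : List Int} (hp : pvGood p.length p) (m : Nat) :
    pvPow (pvApply p p 0) m = pvPow p (2 * m) := by
  induction m with
  | zero =>
    show pvId (pvApply p p 0).length = pvId p.length
    rw [pvApply_length]
  | succ m ih =>
    have e1 : pvPow (pvApply p p 0) (m + 1)
        = pvApply (pvPow (pvApply p p 0) m) (pvApply p p 0) 0 := rfl
    rw [e1, ih, ← pvApply_apply (pvPow p (2 * m)) p p 0 (pvPow_good hp _)]
    have e2 : pvApply (pvApply (pvPow p (2 * m)) p 0) p 0 = pvPow p (2 * m + 1 + 1) := rfl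
    rw [e2]
    have e3 : 2 * m + 1 + 1 = 2 * (m + 1) := by omega
    rw [e3]

-- the binary-exponentiation loop computes r ∘ pᵏ
theorem pvPermPower_eq : ∀ (kt : Nat) (p r : List Int) (k : Int), k.toNat = kt →
    pvGood p.length p → pvGood p.length r → r.length = p.length →
    pvPermPower p k r = pvApply r (pvPow p k.toNat) 0 := by
  intro kt
  induction kt using Nat.strong_induction_on with
  | _ kt ih =>
    intro p r k hk hp hr hrl
    by_cases hk0 : k ≤ 0
    · rw [pvPermPower_base hk0]
      have h0 : k.toNat = 0 := by omega
      rw [h0]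
      show r = pvApply r (pvId p.length) 0
      exact (pvApply_id_right hr).symm
    · rw [pvPermPower_step hk0]
      have hks : (k >>> (1 : Nat)) = k / 2 := by
        rw [Int.shiftRight_eq_div_pow]; norm_num
      have hp2 : (p.map fun j => PySem.List.pyGetD p j 0) = pvApply p p 0 := rfl
      rw [hp2, hks]
      have hlen2 : (pvApply p p 0).length = p.length := pvApply_length ..
      have hgood2 : pvGood (pvApply p p 0).length (pvApply p p 0) := by
        rw [hlen2]; exact pvGood_apply hp hp
      have hdiv : (k / 2).toNat = k.toNat / 2 := by omega
      have hlt : (k / 2).toNat < kt := by omega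
      have hpar : PySem.Int.band k 1 = k % 2 := by
        rw [PySem.Int.band_one, PySem.Int.mod_eq_emod_of_pos (by omega)]
      by_cases hodd : PySem.Int.band k 1 ≠ 0
      · rw [if_pos hodd]
        have hr'2 : (r.map fun j => PySem.List.pyGetD p j 0) = pvApply r p 0 := rfl
        rw [hr'2]
        have hrg : pvGood (pvApply p p 0).length (pvApply r p 0) := by
          rw [hlen2]; exact pvGood_apply hr hp
        have hrl' : (pvApply r p 0).length = (pvApply p p 0).length := by
          rw [pvApply_length, pvApply_length, hrl]
        rw [ih _ hlt _ _ _ rfl hgood2 hrg hrl']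
        rw [hdiv, pvPow_sq hp]
        rw [pvApply_apply r p _ 0 hr]
        rw [pvPow_succ_left hp]
        rw [hpar] at hodd
        have hm : 2 * (k.toNat / 2) + 1 = k.toNat := by omega
        rw [hm]
      · rw [if_neg hodd]
        have hrg : pvGood (pvApply p p 0).length r := by rw [hlen2]; exact hr
        have hrl' : r.length = (pvApply p p 0).length := by rw [pvApply_length, hrl]
        rw [ih _ hlt _ _ _ rfl hgood2 hrg hrl']
        rw [hdiv, pvPow_sq hp]
        rw [hpar, not_ne_iff] at hodd
        have hm : 2 * (k.toNat / 2) = k.toNat := by omega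
        rw [hm]

theorem pvBase_len (n : Nat) : (pvUnsortA (pvId n)).length = n := by
  rw [pvUnsortA_length, pvId_length]

theorem pvBase_good (n : Nat) : pvGood (pvUnsortA (pvId n)).length (pvUnsortA (pvId n)) := by
  rw [pvBase_len]
  intro i hi
  exact pvGood_id n i (pvUnsortA_mem hi)

-- applying the one-pass index permutation = one pass of A's shuffle
theorem pvApply_base {α : Type} (s : List α) (d : α) :
    pvApply (pvUnsortA (pvId s.length)) s d = pvUnsortA s := by
  calc pvApply (pvUnsortA (pvId s.length)) s d
      = pvUnsortA ((pvId s.length).map fun i => PySem.List.pyGetD s i d) :=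
        (pvUnsortA_map _ _).symm
    _ = pvUnsortA (pvApply (pvId s.length) s d) := rfl
    _ = pvUnsortA s := by rw [pvApply_id_left]

theorem pvApply_pow_base {α : Type} (n : Nat) :
    ∀ (m : Nat) (s : List α) (d : α), s.length = n →
      pvApply (pvPow (pvUnsortA (pvId n)) m) s d = pvUnsortA^[m] s := by
  intro m
  induction m with
  | zero =>
    intro s d hs
    show pvApply (pvId (pvUnsortA (pvId n)).length) s d = s
    rw [pvBase_len, ← hs]
    exact pvApply_id_left s d
  | succ m ih =>
    intro s d hs
    show pvApply (pvApply (pvPow (pvUnsortA (pvId n)) m) (pvUnsortA (pvId n)) 0) s d = _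
    rw [pvApply_apply _ _ s d (pvPow_good (pvBase_good n) m)]
    have hbs : pvApply (pvUnsortA (pvId n)) s d = pvUnsortA s := by
      rw [← hs]; exact pvApply_base s d
    rw [hbs, ih (pvUnsortA s) d (by rw [pvUnsortA_length, hs]),
        Function.iterate_succ_apply]

theorem pvFoldl_const {α β : Type} (l : List β) (f : α → α) (x : α) :
    l.foldl (fun t _ => f t) x = f^[l.length] x := by
  induction l generalizing x with
  | nil => rfl
  | cons y ys ih =>
    rw [List.foldl_cons, ih, List.length_cons, Function.iterate_succ_apply]

-- ===== VERDICT (by name: the statement is the Claim_ definition above) =====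
theorem predictable_shuffle_string_spec : Claim_equal_predictable_shuffle_string := by
  intro my_str _
  unfold Spec_predictable_shuffle_string
  simp only [predictable_shuffle_string, predictable_shuffle_string_alt]
  rw [pvFoldl_const, PySem.List.length_pyRange_one]
  have h0 : (((my_str.toList.reverse.length : Int)) - 0).toNat = my_str.toList.reverse.length := by
    omega
  rw [h0]
  set rev := my_str.toList.reverse with hrev
  set n := rev.length with hn
  have hbase : pvUnsortPermB (PySem.List.pyRange 0 (n : Int) 1) = pvUnsortA (pvId n) := by
    rw [pvUnsortPermB_eq]; rfl
  rw [hbase, pvBase_len]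
  have hpow : pvPermPower (pvUnsortA (pvId n)) ((n : Int) + 1) (PySem.List.pyRange 0 (n : Int) 1)
      = pvPow (pvUnsortA (pvId n)) (n + 1) := by
    have hgr : pvGood (pvUnsortA (pvId n)).length (PySem.List.pyRange 0 (n : Int) 1) := by
      rw [pvBase_len]; exact pvGood_id n
    have hrl : (PySem.List.pyRange 0 (n : Int) 1).length = (pvUnsortA (pvId n)).length := by
      rw [pvBase_len]; exact pvId_length n
    rw [pvPermPower_eq ((n : Int) + 1).toNat _ _ _ rfl (pvBase_good n) hgr hrl]
    have ht : ((n : Int) + 1).toNat = n + 1 := by omega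
    rw [ht]
    have hid : PySem.List.pyRange 0 (n : Int) 1
        = pvId ((pvPow (pvUnsortA (pvId n)) (n + 1)).length) := by
      rw [pvPow_length, pvBase_len]; rfl
    rw [hid, pvApply_id_left]
  rw [hpow]
  show String.ofList (pvUnsortA (pvUnsortA^[n] rev))
      = String.ofList (pvApply (pvPow (pvUnsortA (pvId n)) (n + 1)) rev ' ')
  rw [pvApply_pow_base n (n + 1) rev ' ' rfl,
      ← Function.iterate_succ_apply' pvUnsortA n rev]
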